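-- pv_equiv track=rewrite | github.com/erfanwork02/password-strength-checker | password_checker.py | penalty_repeats
-- ===== SOURCE A (Python) =====
-- from collections import Counter
--
-- def penalty_repeats(pw: str) -> int:
--     # Penalize long runs of same char or very unbalanced characters
--     # Run penalty: each streak >=3 costs 2*(streak-2)
--     penalty = 0
--     streak = 1
--     for i in range(1, len(pw)):
--         if pw[i] == pw[i-1]:
--             streak += 1
--         else:
--             if streak >= 3:
--                 penalty += 2 * (streak - 2)
--             streak = 1
--     if streak >= 3:
--         penalty += 2 * (streak - 2)
--
--     # Frequency skew: if one char is >40% of password, small penalty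
--     if pw:
--         counts = Counter(pw)
--         most = counts.most_common(1)[0][1]
--         if most / len(pw) > 0.4:
--             penalty += 5
--     return min(penalty, 20)
-- ===== SOURCE B (Python) =====
-- from collections import Counter
--
-- def penalty_repeats(pw: str) -> int:
--     # run penalty = 2 * (number of positions whose char equals the two preceding chars):
--     # a run of length L contributes exactly L-2 such positions (for L >= 3), i.e. 2*(L-2).
--     penalty = 2 * sum(a == b == c for a, b, c in zip(pw, pw[1:], pw[2:]))
--     # frequency skew: most/len > 0.4, written exactly over the integers
--     if pw and 5 * max(Counter(pw).values()) > 2 * len(pw):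
--         penalty += 5
--     return min(penalty, 20)
-- ===== Notes on version B (the rewrite author's own statement) =====
-- stated objective: simpler
-- what changed: Replaces the maintained streak counter with its reset logic and duplicated end-of-loop flush by a stateless closed form (the run penalty equals 2 times the number of positions whose character equals the two preceding ones, counted over zip(pw, pw[1:], pw[2:])), and takes the skew threshold as max of the Counter's values via an exact integer inequality.
import Mathlib
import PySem

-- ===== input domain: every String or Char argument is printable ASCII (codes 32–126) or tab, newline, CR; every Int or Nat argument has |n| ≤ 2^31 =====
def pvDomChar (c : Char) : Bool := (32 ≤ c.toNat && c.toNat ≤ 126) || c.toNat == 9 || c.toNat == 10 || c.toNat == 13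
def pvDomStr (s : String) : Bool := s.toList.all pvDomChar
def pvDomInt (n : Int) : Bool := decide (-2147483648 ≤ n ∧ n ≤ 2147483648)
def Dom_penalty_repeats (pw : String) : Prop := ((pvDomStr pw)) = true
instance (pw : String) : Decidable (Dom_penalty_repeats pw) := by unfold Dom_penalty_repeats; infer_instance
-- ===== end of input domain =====

-- B replaces A's streak counter (with its reset logic and duplicated final flush) by a stateless
-- count of positions whose char equals the two preceding ones; same return value.
-- In BOTH ports Python's float test `most / len(pw) > 0.4` is rendered as the integer inequality
-- `5 * most > 2 * len(pw)`, which agrees with the float comparison for every string of length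
-- below 2^50 (IEEE-754 rounding is monotone and the gap to 0.4 is at least 1/(5*len)).

-- ===== PORT A =====
def penalty_repeats (pw : String) : Int :=
  let cs := pw.toList
  let n : Int := (cs.length : Int)
  let st :=
    (PySem.List.pyRange 1 n 1).foldl
      (fun (st : Int × Int) (i : Int) =>
        if PySem.List.pyGetD cs i ' ' = PySem.List.pyGetD cs (i - 1) ' ' then
          (st.1, st.2 + 1)
        else
          (if st.2 ≥ 3 then st.1 + 2 * (st.2 - 2) else st.1, 1))
      ((0 : Int), (1 : Int))
  let penalty := if st.2 ≥ 3 then st.1 + 2 * (st.2 - 2) else st.1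
  let penalty :=
    if cs ≠ [] then
      let counts := PySem.Dict.counter cs
      -- most_common(1)[0][1]: the count of a maximal item; only the count is used
      match PySem.List.max? counts.items (fun p => p.2) with
      | some kv => if 5 * kv.2 > 2 * n then penalty + 5 else penalty
      | none => penalty  -- unreachable: cs ≠ []
    else penalty
  min penalty 20

-- ===== PORT B =====
def penalty_repeats_alt (pw : String) : Int :=
  let cs := pw.toList
  let penalty : Int :=
    2 * (((cs.zip (PySem.List.slice cs (some 1) none)).zip (PySem.List.slice cs (some 2) none)).map
          (fun t => if t.1.1 = t.1.2 ∧ t.1.2 = t.2 then (1 : Int) else 0)).sum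
  let penalty :=
    if cs ≠ [] then
      match PySem.List.max? (PySem.Dict.counter cs).values (fun v => v) with
      | some m => if 5 * m > 2 * (cs.length : Int) then penalty + 5 else penalty
      | none => penalty  -- unreachable: cs ≠ []
    else penalty
  min penalty 20

-- ===== PRECONDITION & SPEC =====
def Spec_penalty_repeats (pw : String) (out : Int) : Prop := out = penalty_repeats_alt pw
instance (pw : String) (out : Int) : Decidable (Spec_penalty_repeats pw out) := by unfold Spec_penalty_repeats; infer_instance

-- ===== CLAIM (what is proved, stated in full; the proofs are below) =====
def Claim_equal_penalty_repeats : Prop := ∀ (pw : String), Dom_penalty_repeats pw → Spec_penalty_repeats pw (penalty_repeats pw)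

-- ===== LEMMAS AND PROOFS =====

-- A's loop, structurally: state (penalty, streak), previous char, remaining chars
def pvGoA : Int × Int → Char → List Char → Int × Int
  | st, _, [] => st
  | st, prev, c :: rest =>
    if c = prev then pvGoA (st.1, st.2 + 1) c rest
    else pvGoA (if st.2 ≥ 3 then st.1 + 2 * (st.2 - 2) else st.1, 1) c rest

def pvPen (s : Int) : Int := if s ≥ 3 then 2 * (s - 2) else 0

-- count of triple positions, carrying "previous two chars were equal" and the previous char
def pvCnt : Bool → Char → List Char → Int
  | _, _, [] => 0
  | b, c, d :: ds => (if b ∧ d = c then (1 : Int) else 0) + pvCnt (d == c) d ds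

-- count of triple positions given the two previous chars
def pvTri : Char → Char → List Char → Int
  | _, _, [] => 0
  | a, b, c :: r => (if a = b ∧ b = c then (1 : Int) else 0) + pvTri b c r

lemma pv_bridge (full : List Char) :
    ∀ (k j : Nat) (st : Int × Int) (hlen : full.length = j + 1 + k),
    (PySem.List.pyRange ((j : Int) + 1) ((full.length : Int)) 1).foldl
      (fun (st : Int × Int) (i : Int) =>
        if PySem.List.pyGetD full i ' ' = PySem.List.pyGetD full (i - 1) ' ' then
          (st.1, st.2 + 1)
        else
          (if st.2 ≥ 3 then st.1 + 2 * (st.2 - 2) else st.1, 1)) st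
      = pvGoA st (full[j]'(by omega)) (full.drop (j + 1)) := by
  intro k
  induction k with
  | zero =>
    intro j st hlen
    rw [PySem.List.pyRange_one_eq_nil (by omega)]
    rw [List.drop_eq_nil_of_le (by omega)]
    rfl
  | succ k ih =>
    intro j st hlen
    have hj1 : j + 1 < full.length := by omega
    rw [PySem.List.pyRange_one_cons (by omega)]
    have e1 : PySem.List.pyGetD full ((j : Int) + 1) ' ' = full[j + 1]'hj1 := by
      have h : ((j : Int) + 1) = ((j + 1 : Nat) : Int) := by push_cast; ring
      rw [h, PySem.List.pyGetD_natCast, List.getD_eq_getElem _ _ hj1]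
    have e0 : PySem.List.pyGetD full ((j : Int) + 1 - 1) ' ' = full[j]'(by omega) := by
      have h : ((j : Int) + 1 - 1) = ((j : Nat) : Int) := by ring
      rw [h, PySem.List.pyGetD_natCast, List.getD_eq_getElem _ _ (by omega)]
    have e2 : ((j : Int) + 1 + 1) = (((j + 1 : Nat) : Int) + 1) := by push_cast; ring
    rw [List.drop_eq_getElem_cons hj1]
    simp only [List.foldl_cons, e1, e0, pvGoA]
    by_cases hc : full[j + 1]'hj1 = full[j]'(by omega)
    · rw [if_pos hc, if_pos hc, e2, ih (j + 1) _ (by omega)]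
    · rw [if_neg hc, if_neg hc, e2, ih (j + 1) _ (by omega)]

-- pv_bridge at j = 0: A's index loop over a :: t is the structural recursion pvGoA
lemma pv_bridge0 (a : Char) (t : List Char) (st : Int × Int) :
    (PySem.List.pyRange 1 (((a :: t).length : Int)) 1).foldl
      (fun (st : Int × Int) (i : Int) =>
        if PySem.List.pyGetD (a :: t) i ' ' = PySem.List.pyGetD (a :: t) (i - 1) ' ' then
          (st.1, st.2 + 1)
        else
          (if st.2 ≥ 3 then st.1 + 2 * (st.2 - 2) else st.1, 1)) st
      = pvGoA st a t := by
  have h := pv_bridge (a :: t) t.length 0 st (by simp; omega)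
  have h0 : (((0 : Nat) : Int) + 1) = (1 : Int) := by norm_num
  rw [h0] at h
  exact h

lemma pv_pen_succ (s : Int) (hs : 1 ≤ s) : pvPen (s + 1) = pvPen s + (if 2 ≤ s then 2 else 0) := by
  unfold pvPen; split_ifs <;> omega

lemma pv_goA_cnt : ∀ (cs : List Char) (c : Char) (p s : Int), 1 ≤ s →
    (if (pvGoA (p, s) c cs).2 ≥ 3 then (pvGoA (p, s) c cs).1 + 2 * ((pvGoA (p, s) c cs).2 - 2)
     else (pvGoA (p, s) c cs).1)
      = p + pvPen s + 2 * pvCnt (decide (2 ≤ s)) c cs := by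
  intro cs
  induction cs with
  | nil =>
    intro c p s hs
    simp only [pvGoA, pvCnt, pvPen]
    split_ifs <;> ring
  | cons d ds ih =>
    intro c p s hs
    simp only [pvGoA, pvCnt]
    by_cases hc : d = c
    · rw [if_pos hc, ih d p (s + 1) (by omega)]
      subst hc
      rw [pv_pen_succ s hs]
      have h2 : (2 : Int) ≤ s + 1 := by omega
      by_cases h3 : (2 : Int) ≤ s
      · simp only [decide_eq_true h2, decide_eq_true h3, if_pos h3,
          beq_self_eq_true, true_and]
        simp only [if_pos trivial]
        ring
      · have hd3 : decide ((2:Int) ≤ s) = false := by simp [h3]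
        simp only [decide_eq_true h2, hd3, if_neg h3]
        simp only [Bool.false_eq_true, false_and, if_false, beq_self_eq_true]
        ring
    · rw [if_neg hc, ih d _ 1 (by omega)]
      have hb : (d == c) = false := by simp [hc]
      have hd1 : decide ((2:Int) ≤ 1) = false := by decide
      simp only [hb, hd1, hc, and_false, if_false]
      have hp1 : pvPen 1 = 0 := by unfold pvPen; norm_num
      rw [hp1]
      unfold pvPen
      split_ifs <;> ring

lemma pv_cnt_tri : ∀ (r : List Char) (a b : Char), pvCnt (b == a) b r = pvTri a b r := by
  intro r
  induction r with
  | nil => intro a b; rfl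
  | cons c r' ih =>
    intro a b
    show (if ((b == a) = true) ∧ c = b then (1 : Int) else 0) + pvCnt (c == b) c r'
        = (if a = b ∧ b = c then (1 : Int) else 0) + pvTri b c r'
    rw [ih b c]
    congr 1
    have hiff : (((b == a) = true) ∧ c = b) ↔ (a = b ∧ b = c) := by
      rw [beq_iff_eq]
      exact ⟨fun ⟨x, y⟩ => ⟨x.symm, y.symm⟩, fun ⟨x, y⟩ => ⟨x.symm, y.symm⟩⟩
    exact if_congr hiff rfl rfl

lemma pv_zip_tri : ∀ (r : List Char) (a b : Char),
    ((((a :: b :: r).zip (b :: r)).zip r).map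
      (fun t => if t.1.1 = t.1.2 ∧ t.1.2 = t.2 then (1 : Int) else 0)).sum = pvTri a b r := by
  intro r
  induction r with
  | nil => intro a b; rfl
  | cons c r' ih =>
    intro a b
    simp only [List.zip_cons_cons, List.map_cons, List.sum_cons, pvTri]
    rw [← ih b c]
    simp [List.zip_cons_cons]

lemma pv_max?_map {α β κ : Type} [LT κ] [DecidableLT κ] (g : α → β) (key : β → κ) (l : List α) :
    PySem.List.max? (l.map g) key = (PySem.List.max? l (fun x => key (g x))).map g := by
  unfold PySem.List.max?
  rw [List.foldl_map]
  suffices h : ∀ (acc : Option α),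
      l.foldl (fun acc x => match acc with
        | none => some (g x)
        | some m => if key m < key (g x) then some (g x) else some m) (acc.map g)
      = (l.foldl (fun acc x => match acc with
        | none => some x
        | some m => if key (g m) < key (g x) then some x else some m) acc).map g by
    exact h none
  induction l with
  | nil => intro acc; rfl
  | cons x xs ih =>
    intro acc
    simp only [List.foldl_cons]
    cases acc with
    | none => exact ih (some x)
    | some m =>
      simp only [Option.map_some]
      by_cases h : key (g m) < key (g x)
      · rw [if_pos h, if_pos h]; exact ih (some x)
      · rw [if_neg h, if_neg h]; exact ih (some m)

-- the frequency parts of the two ports agree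
lemma pv_freq (cs : List Char) :
    PySem.List.max? (PySem.Dict.counter cs).values (fun v => v)
      = (PySem.List.max? (PySem.Dict.counter cs).items (fun p => p.2)).map (fun p => p.2) := by
  have h : (PySem.Dict.counter cs).values = (PySem.Dict.counter cs).items.map (fun p => p.2) := rfl
  rw [h, pv_max?_map (fun p => p.2) (fun v => v) (PySem.Dict.counter cs).items]

-- the run-penalty parts of the two ports agree
lemma pv_runs (cs : List Char) :
    (if ((PySem.List.pyRange 1 ((cs.length : Int)) 1).foldl
          (fun (st : Int × Int) (i : Int) =>
            if PySem.List.pyGetD cs i ' ' = PySem.List.pyGetD cs (i - 1) ' ' then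
              (st.1, st.2 + 1)
            else
              (if st.2 ≥ 3 then st.1 + 2 * (st.2 - 2) else st.1, 1)) ((0 : Int), (1 : Int))).2 ≥ 3
     then ((PySem.List.pyRange 1 ((cs.length : Int)) 1).foldl
          (fun (st : Int × Int) (i : Int) =>
            if PySem.List.pyGetD cs i ' ' = PySem.List.pyGetD cs (i - 1) ' ' then
              (st.1, st.2 + 1)
            else
              (if st.2 ≥ 3 then st.1 + 2 * (st.2 - 2) else st.1, 1)) ((0 : Int), (1 : Int))).1
          + 2 * (((PySem.List.pyRange 1 ((cs.length : Int)) 1).foldl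
          (fun (st : Int × Int) (i : Int) =>
            if PySem.List.pyGetD cs i ' ' = PySem.List.pyGetD cs (i - 1) ' ' then
              (st.1, st.2 + 1)
            else
              (if st.2 ≥ 3 then st.1 + 2 * (st.2 - 2) else st.1, 1)) ((0 : Int), (1 : Int))).2 - 2)
     else ((PySem.List.pyRange 1 ((cs.length : Int)) 1).foldl
          (fun (st : Int × Int) (i : Int) =>
            if PySem.List.pyGetD cs i ' ' = PySem.List.pyGetD cs (i - 1) ' ' then
              (st.1, st.2 + 1)
            else
              (if st.2 ≥ 3 then st.1 + 2 * (st.2 - 2) else st.1, 1)) ((0 : Int), (1 : Int))).1)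
      = 2 * (((cs.zip (PySem.List.slice cs (some 1) none)).zip (PySem.List.slice cs (some 2) none)).map
          (fun t => if t.1.1 = t.1.2 ∧ t.1.2 = t.2 then (1 : Int) else 0)).sum := by
  match cs with
  | [] =>
    norm_num [PySem.List.pyRange_one_eq_nil, PySem.List.slice_from_one]
  | [a] =>
    norm_num [PySem.List.pyRange_one_eq_nil, PySem.List.slice_from_one]
  | a :: b :: r =>
    rw [pv_bridge0 a (b :: r) ((0 : Int), (1 : Int))]
    rw [pv_goA_cnt (b :: r) a 0 1 (by norm_num)]
    have hd : decide ((2 : Int) ≤ 1) = false := by decide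
    rw [hd]
    have hcnt : pvCnt false a (b :: r) = pvCnt (b == a) b r := by
      show (if (false = true) ∧ b = a then (1 : Int) else 0) + pvCnt (b == a) b r = _
      norm_num
    rw [hcnt, pv_cnt_tri r a b]
    rw [PySem.List.slice_from_one, PySem.List.slice_from (a :: b :: r) (by norm_num : (0 : Int) ≤ 2)]
    have ht : (a :: b :: r).tail = b :: r := rfl
    have h2 : (a :: b :: r).drop (2 : Int).toNat = r := rfl
    rw [ht, h2, pv_zip_tri r a b]
    have hp1 : pvPen 1 = 0 := by unfold pvPen; norm_num
    rw [hp1]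
    ring

-- ===== VERDICT (by name: the statement is the Claim_ definition above) =====
theorem penalty_repeats_spec : Claim_equal_penalty_repeats := by
  intro pw _
  unfold Spec_penalty_repeats penalty_repeats penalty_repeats_alt
  simp only []
  rw [pv_runs pw.toList]
  by_cases hne : pw.toList = []
  · simp [hne]
  · rw [if_pos hne, if_pos hne, pv_freq pw.toList]
    cases hm : PySem.List.max? (PySem.Dict.counter pw.toList).items (fun p => p.2) with
    | none => rfl
    | some kv => rfl
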